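-- pv_equiv track=rewrite | github.com/ITCR-IV/Star-Force | Star Force.py | check_flag_click
-- ===== SOURCE A (Python) =====
-- def check_flag_click(mx,my,i=0):
--     if i==50:
--         return i
--     else:
--         column=i%10
--         row=i//10
--         x=307+20+(32+34)*column
--         y=150+40+(24+55)*row
--         if mx>=x and mx<=(x+32):
--             if my>=y and my<=(y+24):
--                 return i
--         return check_flag_click(mx,my,i+1)
-- ===== SOURCE B (Python) =====
-- def check_flag_click(mx, my, i=0):
--     for j in range(i, 50):
--         x = 327 + 66 * (j % 10)
--         y = 190 + 79 * (j // 10)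
--         if x <= mx <= x + 32 and y <= my <= y + 24:
--             return j
--     return 50
-- ===== Notes on version B (the rewrite author's own statement) =====
-- stated objective: simpler
-- what changed: Replaces the tail recursion over cell indices with a single flat for-loop over range(i, 50) using pre-folded constants (327 + 66*col, 190 + 79*row), returning the first hit or 50 after the loop.
-- outside the precondition, e.g. on check_flag_click(0, 0, -948): A returns 50, B returns 50; on check_flag_click(0, 0, 51): A raises RecursionError, B returns 50
import Mathlib
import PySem

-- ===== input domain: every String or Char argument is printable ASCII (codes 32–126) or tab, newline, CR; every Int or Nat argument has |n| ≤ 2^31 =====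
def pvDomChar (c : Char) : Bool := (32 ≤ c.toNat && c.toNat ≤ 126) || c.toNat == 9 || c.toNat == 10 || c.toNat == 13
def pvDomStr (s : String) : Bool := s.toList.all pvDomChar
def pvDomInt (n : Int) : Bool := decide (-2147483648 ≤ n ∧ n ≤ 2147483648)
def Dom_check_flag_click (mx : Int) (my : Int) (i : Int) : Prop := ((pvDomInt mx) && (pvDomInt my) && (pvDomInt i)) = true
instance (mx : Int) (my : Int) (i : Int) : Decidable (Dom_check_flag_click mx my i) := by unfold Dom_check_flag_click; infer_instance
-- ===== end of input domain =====

-- ===== PORT A =====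
-- B replaces A's tail recursion with one flat loop over range(i,50); objective: simpler.
-- Pre_ excludes i > 50 (A recurses past its base case: RecursionError) and i < -900
-- (A exceeds Python's recursion limit; -900 is a safe margin under the default limit of 1000).
-- fuel makes the Lean transcription total; under Pre_ it never runs out.
def check_flag_click_go (mx : Int) (my : Int) : Nat → Int → Int
  | 0, i => i
  | fuel + 1, i =>
    if i = 50 then i
    else
      let column := PySem.Int.mod i 10
      let row := PySem.Int.floordiv i 10
      let x := 307 + 20 + (32 + 34) * column
      let y := 150 + 40 + (24 + 55) * row
      if mx ≥ x ∧ mx ≤ x + 32 then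
        if my ≥ y ∧ my ≤ y + 24 then i
        else check_flag_click_go mx my fuel (i + 1)
      else check_flag_click_go mx my fuel (i + 1)

def check_flag_click (mx : Int) (my : Int) (i : Int) : Int :=
  check_flag_click_go mx my (51 - i).toNat i

-- ===== PORT B =====
def pvHit (mx : Int) (my : Int) (j : Int) : Bool :=
  let x := 327 + 66 * PySem.Int.mod j 10
  let y := 190 + 79 * PySem.Int.floordiv j 10
  x ≤ mx && mx ≤ x + 32 && y ≤ my && my ≤ y + 24

def check_flag_click_alt (mx : Int) (my : Int) (i : Int) : Int :=
  match (PySem.List.pyRange i 50 1).find? (pvHit mx my) with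
  | some j => j
  | none => 50

-- ===== PRECONDITION & SPEC =====
-- Pre_ excludes i > 50, on which the Python A raises RecursionError (the recursion never
-- reaches its base case), and i < -900, on which A exceeds Python's recursion limit; the
-- margin between -900 and the exact limit excludes a few inputs on which A still returns.
def Pre_check_flag_click (mx : Int) (my : Int) (i : Int) : Prop := -900 ≤ i ∧ i ≤ 50
instance (mx : Int) (my : Int) (i : Int) : Decidable (Pre_check_flag_click mx my i) := by unfold Pre_check_flag_click; infer_instance
def pvWitness_check_flag_click : Int × Int × Int := (400, 200, 0)
def Spec_check_flag_click (mx : Int) (my : Int) (i : Int) (out : Int) : Prop := out = check_flag_click_alt mx my i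
instance (mx : Int) (my : Int) (i : Int) (out : Int) : Decidable (Spec_check_flag_click mx my i out) := by unfold Spec_check_flag_click; infer_instance

-- ===== CLAIM (what is proved, stated in full; the proofs are below) =====
def Claim_equal_check_flag_click : Prop := ∀ (mx : Int) (my : Int) (i : Int), Dom_check_flag_click mx my i → Pre_check_flag_click mx my i → Spec_check_flag_click mx my i (check_flag_click mx my i)

-- ===== LEMMAS AND PROOFS =====

lemma go_eq_alt (mx my : Int) : ∀ (fuel : Nat) (i : Int), i ≤ 50 → fuel = (51 - i).toNat →
    check_flag_click_go mx my fuel i = check_flag_click_alt mx my i := by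
  intro fuel
  induction fuel with
  | zero => intro i hi hf; omega
  | succ f ih =>
    intro i hi hf
    by_cases h50 : i = 50
    · subst h50
      simp [check_flag_click_go, check_flag_click_alt,
        PySem.List.pyRange_one_eq_nil (le_refl (50 : Int))]
    · have hlt : i < 50 := lt_of_le_of_ne hi h50
      have hrec : check_flag_click_go mx my f (i + 1) = check_flag_click_alt mx my (i + 1) :=
        ih (i + 1) (by omega) (by omega)
      have hcons : PySem.List.pyRange i 50 1 = i :: PySem.List.pyRange (i + 1) 50 1 :=
        PySem.List.pyRange_one_cons hlt
      rw [check_flag_click_alt, hcons]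
      simp only [List.find?]
      cases hp : pvHit mx my i with
      | true =>
        have hP : (327 + 66 * (i % 10) ≤ mx ∧ mx ≤ 327 + 66 * (i % 10) + 32) ∧
            (190 + 79 * (i / 10) ≤ my ∧ my ≤ 190 + 79 * (i / 10) + 24) := by
          simp [pvHit] at hp; omega
        simp [check_flag_click_go, h50]
        omega
      | false =>
        have hP : ¬ ((327 + 66 * (i % 10) ≤ mx ∧ mx ≤ 327 + 66 * (i % 10) + 32) ∧
            (190 + 79 * (i / 10) ≤ my ∧ my ≤ 190 + 79 * (i / 10) + 24)) := by
          simp [pvHit] at hp; omega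
        rw [← check_flag_click_alt, ← hrec]
        simp [check_flag_click_go, h50]
        omega

-- ===== VERDICT (by name: the statement is the Claim_ definition above) =====
theorem check_flag_click_spec : Claim_equal_check_flag_click := by
  intro mx my i _ hP
  unfold Spec_check_flag_click check_flag_click
  exact go_eq_alt mx my _ i hP.2 rfl
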